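-- pv_equiv track=rewrite | github.com/fjc-oai/pbag | perf/x/profiler/a.py | heavy_computation
-- ===== SOURCE A (Python) =====
-- def heavy_computation(n):
--     total = 0
--
--     # Instead of multiple small functions, we inline the arithmetic.
--     def compute_value(i, j):
--         prod = i * j
--         sum_val = i + j
--         inc_sum = sum_val + 1
--         return prod % inc_sum
--
--     # Process a batch of computed results. This function is called every ~10 operations.
--     def process_batch(batch):
--         result = 0
--         for value in batch:
--             result += value
--         return result
--
--     batch = []
--     for i in range(n):
--         for j in range(n):
--             batch.append(compute_value(i, j))
--             if len(batch) == 10: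
--                 total += process_batch(batch)
--                 batch = []
--     if batch:  # Process remaining operations if they don't fill a complete batch.
--         total += process_batch(batch)
--     return total
-- ===== SOURCE B (Python) =====
-- def heavy_computation(n):
--     # Symmetric pair sum: diagonal once + strictly-upper triangle twice.
--     diag = 0
--     for i in range(n):
--         diag += (i * i) % (2 * i + 1)
--     off = 0
--     for i in range(n):
--         for j in range(i + 1, n):
--             off += (i * j) % (i + j + 1)
--     return diag + 2 * off
-- ===== Notes on version B (the rewrite author's own statement) =====
-- stated objective: faster
-- what changed: Exploits the symmetry (i*j)%(i+j+1) == (j*i)%(j+i+1): sums the diagonal once and the strict upper triangle once (doubled), instead of the full n x n grid with explicit batch lists of size 10.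
import Mathlib
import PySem

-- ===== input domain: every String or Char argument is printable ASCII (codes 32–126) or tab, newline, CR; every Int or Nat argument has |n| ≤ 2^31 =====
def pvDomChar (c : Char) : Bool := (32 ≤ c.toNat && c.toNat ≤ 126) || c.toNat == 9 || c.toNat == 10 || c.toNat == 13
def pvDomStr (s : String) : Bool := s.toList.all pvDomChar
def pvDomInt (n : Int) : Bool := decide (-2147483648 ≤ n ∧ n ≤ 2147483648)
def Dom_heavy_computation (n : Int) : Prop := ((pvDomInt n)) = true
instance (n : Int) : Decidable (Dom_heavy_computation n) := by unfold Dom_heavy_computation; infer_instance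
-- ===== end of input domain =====

-- B sums the diagonal once and the strict upper triangle once (doubled, by the symmetry of
-- (i*j) % (i+j+1)) instead of A's full n×n grid with 10-element batch lists: ~half the work.

-- ===== PORT A =====
-- compute_value(i, j)
def pvComputeValue (i j : Int) : Int :=
  let prod := i * j
  let sum_val := i + j
  let inc_sum := sum_val + 1
  PySem.Int.mod prod inc_sum

-- process_batch(batch)
def pvProcessBatch (batch : List Int) : Int :=
  batch.foldl (fun result value => result + value) 0

def heavy_computation (n : Int) : Int :=
  -- loop state = (total, batch)
  let s := (PySem.List.pyRange 0 n 1).foldl (fun s i =>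
      (PySem.List.pyRange 0 n 1).foldl (fun (s : Int × List Int) j =>
        let batch := s.2 ++ [pvComputeValue i j]
        if batch.length = 10 then (s.1 + pvProcessBatch batch, ([] : List Int))
        else (s.1, batch)) s) ((0 : Int), ([] : List Int))
  if s.2 ≠ [] then s.1 + pvProcessBatch s.2 else s.1

-- ===== PORT B =====
def heavy_computation_alt (n : Int) : Int :=
  let diag := (PySem.List.pyRange 0 n 1).foldl
      (fun d i => d + PySem.Int.mod (i * i) (2 * i + 1)) 0
  let off := (PySem.List.pyRange 0 n 1).foldl (fun o i =>
      (PySem.List.pyRange (i + 1) n 1).foldl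
        (fun o j => o + PySem.Int.mod (i * j) (i + j + 1)) o) 0
  diag + 2 * off

-- ===== PRECONDITION & SPEC =====
def Spec_heavy_computation (n : Int) (out : Int) : Prop := out = heavy_computation_alt n
instance (n : Int) (out : Int) : Decidable (Spec_heavy_computation n out) := by unfold Spec_heavy_computation; infer_instance

-- ===== CLAIM (what is proved, stated in full; the proofs are below) =====
def Claim_equal_heavy_computation : Prop := ∀ (n : Int), Dom_heavy_computation n → Spec_heavy_computation n (heavy_computation n)

-- ===== LEMMAS AND PROOFS =====

-- the common pair value, Nat-indexed for induction
def pvG (a b : Nat) : Int := PySem.Int.mod ((a : Int) * b) ((a : Int) + b + 1)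

theorem pvG_symm (a b : Nat) : pvG a b = pvG b a := by unfold pvG; ring_nf

-- full-grid sum, diagonal sum, strict-upper-triangle sum over range m
def pvA (m : Nat) : Int :=
  ((List.range m).map (fun a => ((List.range m).map (fun b => pvG a b)).sum)).sum
def pvD (m : Nat) : Int := ((List.range m).map (fun a => pvG a a)).sum
def pvO (m : Nat) : Int :=
  ((List.range m).map (fun a =>
    ((List.range (m - (a + 1))).map (fun b => pvG a (a + 1 + b))).sum)).sum

-- the symmetry identity: grid = diagonal + twice the strict upper triangle
theorem pv_key (m : Nat) : pvA m = pvD m + 2 * pvO m := by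
  induction m with
  | zero => simp [pvA, pvD, pvO]
  | succ m ih =>
    have hA : pvA (m + 1) = pvA m + ((List.range m).map (fun a => pvG a m)).sum
        + ((List.range m).map (fun b => pvG m b)).sum + pvG m m := by
      unfold pvA
      rw [List.range_succ]
      simp only [List.map_append, List.sum_append, List.map_cons, List.map_nil,
        List.sum_cons, List.sum_nil, add_zero]
      rw [PySem.List.sum_map_add_int (List.range m)
        (fun a => ((List.range m).map (fun b => pvG a b)).sum) (fun a => pvG a m)]
      ring
    have hD : pvD (m + 1) = pvD m + pvG m m := by
      unfold pvD; rw [List.range_succ]; simp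
    have hO : pvO (m + 1) = pvO m + ((List.range m).map (fun a => pvG a m)).sum := by
      unfold pvO
      rw [List.range_succ]
      simp only [List.map_append, List.sum_append, List.map_cons, List.map_nil,
        List.sum_cons, List.sum_nil, add_zero, Nat.sub_self, List.range_zero]
      have hcong : (List.range m).map (fun a =>
            ((List.range (m + 1 - (a + 1))).map (fun b => pvG a (a + 1 + b))).sum)
          = (List.range m).map (fun a =>
            ((List.range (m - (a + 1))).map (fun b => pvG a (a + 1 + b))).sum + pvG a m) := by
        apply List.map_congr_left
        intro a ha
        have ham : a < m := List.mem_range.mp ha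
        have h1 : m + 1 - (a + 1) = (m - (a + 1)) + 1 := by omega
        rw [h1, List.range_succ]
        simp only [List.map_append, List.sum_append, List.map_cons, List.map_nil,
          List.sum_cons, List.sum_nil, add_zero]
        have h2 : a + 1 + (m - (a + 1)) = m := by omega
        rw [h2]
      rw [hcong, PySem.List.sum_map_add_int]
    have hsym : ((List.range m).map (fun b => pvG m b)).sum
        = ((List.range m).map (fun a => pvG a m)).sum := by
      congr 1
      apply List.map_congr_left
      intro b _
      exact pvG_symm m b
    rw [hA, hD, hO, hsym, ih]
    ring

-- A's batching step (definitionally the inner lambda of heavy_computation)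
def pvStep (i : Int) (s : Int × List Int) (j : Int) : Int × List Int :=
  let batch := s.2 ++ [pvComputeValue i j]
  if batch.length = 10 then (s.1 + pvProcessBatch batch, ([] : List Int))
  else (s.1, batch)

theorem pvProcessBatch_eq_sum (l : List Int) : pvProcessBatch l = l.sum := by
  simpa [pvProcessBatch] using PySem.List.foldl_add l id 0

-- invariant of A's inner loop: total + pending batch = everything seen so far
theorem pv_inner_inv (i : Int) (l : List Int) (s : Int × List Int) :
    (l.foldl (pvStep i) s).1 + (l.foldl (pvStep i) s).2.sum
      = s.1 + s.2.sum + (l.map (pvComputeValue i)).sum := by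
  induction l generalizing s with
  | nil => simp
  | cons x xs ih =>
    simp only [List.foldl_cons, List.map_cons, List.sum_cons]
    rw [ih]
    by_cases h : s.2.length = 9 <;>
      simp [pvStep, h, pvProcessBatch_eq_sum] <;> ring

theorem pv_outer_inv (n : Int) (L : List Int) (s : Int × List Int) :
    (L.foldl (fun s i => (PySem.List.pyRange 0 n 1).foldl (pvStep i) s) s).1
      + (L.foldl (fun s i => (PySem.List.pyRange 0 n 1).foldl (pvStep i) s) s).2.sum
      = s.1 + s.2.sum
        + (L.map (fun i => ((PySem.List.pyRange 0 n 1).map (pvComputeValue i)).sum)).sum := by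
  induction L generalizing s with
  | nil => simp
  | cons x xs ih =>
    simp only [List.foldl_cons, List.map_cons, List.sum_cons]
    rw [ih, pv_inner_inv]
    ring

-- A computes the plain full-grid double sum
theorem pv_A_eq (n : Int) : heavy_computation n
    = ((PySem.List.pyRange 0 n 1).map (fun i =>
        ((PySem.List.pyRange 0 n 1).map (pvComputeValue i)).sum)).sum := by
  unfold heavy_computation
  have h := pv_outer_inv n (PySem.List.pyRange 0 n 1) ((0 : Int), ([] : List Int))
  simp only [List.sum_nil, zero_add] at h
  set t := (PySem.List.pyRange 0 n 1).foldl
      (fun s i => (PySem.List.pyRange 0 n 1).foldl (pvStep i) s) ((0 : Int), ([] : List Int)) with ht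
  show (if t.2 ≠ [] then t.1 + pvProcessBatch t.2 else t.1) = _
  by_cases hb : t.2 = []
  · simp [hb] at h ⊢; omega
  · simp [hb, pvProcessBatch_eq_sum]; omega

theorem pv_A_nat (n : Int) : heavy_computation n = pvA n.toNat := by
  rw [pv_A_eq, PySem.List.pyRange_one 0 n]
  simp only [List.map_map, Function.comp_def, zero_add, Int.sub_zero]
  rfl

theorem pv_B_nat (n : Int) :
    heavy_computation_alt n = pvD n.toNat + 2 * pvO n.toNat := by
  unfold heavy_computation_alt
  have hinner : (fun (o : Int) (i : Int) =>
        (PySem.List.pyRange (i + 1) n 1).foldl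
          (fun o j => o + PySem.Int.mod (i * j) (i + j + 1)) o)
      = (fun o i => o + ((PySem.List.pyRange (i + 1) n 1).map
          (fun j => PySem.Int.mod (i * j) (i + j + 1))).sum) := by
    funext o i
    exact PySem.List.foldl_add _ _ o
  rw [hinner, PySem.List.foldl_add, PySem.List.foldl_add]
  simp only [zero_add]
  congr 1
  · -- the diagonal loop
    rw [PySem.List.pyRange_one 0 n]
    simp only [List.map_map, Function.comp_def, zero_add, Int.sub_zero]
    unfold pvD
    congr 1
    apply List.map_congr_left
    intro a _
    rw [show (2 * (a : Int) + 1) = (a : Int) + a + 1 from by ring]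
    rfl
  · -- the triangle loop
    congr 1
    rw [PySem.List.pyRange_one 0 n]
    simp only [List.map_map, Function.comp_def, zero_add, Int.sub_zero]
    unfold pvO
    congr 1
    apply List.map_congr_left
    intro a _
    rw [PySem.List.pyRange_one ((a : Int) + 1) n]
    simp only [List.map_map, Function.comp_def]
    have hlen : (n - ((a : Int) + 1)).toNat = n.toNat - (a + 1) := by omega
    rw [hlen]
    apply congrArg
    apply List.map_congr_left
    intro b _
    unfold pvG
    push_cast
    congr 1

-- ===== VERDICT (by name: the statement is the Claim_ definition above) =====
theorem heavy_computation_spec : Claim_equal_heavy_computation := by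
  intro n _
  unfold Spec_heavy_computation
  rw [pv_A_nat, pv_B_nat, pv_key]
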